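-- pv_equiv track=rewrite | github.com/marcuspepperl/Euler | 41-50/Eulerp43.py | rule_sort
-- ===== SOURCE A (Python) =====
-- def rule_sort(divisibility_rules):
--     sorted_rules = []
--
--     rule_digits = {}
--     for digits in divisibility_rules.keys():
--         rule_digits[digits] = len(digits)
--
--     for digit_count in sorted(list(set(rule_digits.values()))):
--         digit_count_lst = []
--         for digits, digit_num in rule_digits.items():
--             if digit_num == digit_count:
--                 digit_count_lst.append(digits)
--         sorted_rules.extend(sorted(digit_count_lst, key = divisibility_rules.get, reverse = True))
--
--     return sorted_rules
-- ===== SOURCE B (Python) =====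
-- def rule_sort(divisibility_rules):
--     by_value = sorted(divisibility_rules.keys(), key=divisibility_rules.get, reverse=True)
--     return sorted(by_value, key=len)
-- ===== Notes on version B (the rewrite author's own statement) =====
-- stated objective: idiomatic
-- what changed: Replaces the length-map plus per-length rescan of the dict items with two stacked stable sorts (by value descending, then by length ascending); no length grouping is built, the order emerges from sort stability.
import Mathlib
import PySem

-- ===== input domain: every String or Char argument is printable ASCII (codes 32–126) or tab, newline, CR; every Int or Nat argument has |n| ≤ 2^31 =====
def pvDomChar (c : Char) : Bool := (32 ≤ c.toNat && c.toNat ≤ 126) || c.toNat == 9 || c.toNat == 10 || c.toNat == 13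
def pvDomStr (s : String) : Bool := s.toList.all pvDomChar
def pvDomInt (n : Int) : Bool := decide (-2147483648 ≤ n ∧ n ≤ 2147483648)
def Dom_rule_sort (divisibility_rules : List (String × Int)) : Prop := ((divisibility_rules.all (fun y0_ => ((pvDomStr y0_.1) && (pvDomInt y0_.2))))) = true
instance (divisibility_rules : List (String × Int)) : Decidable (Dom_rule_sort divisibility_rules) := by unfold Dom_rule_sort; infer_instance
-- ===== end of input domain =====

-- B replaces A's length-grouping dict and per-length rescan with two stacked stable sorts
-- (by dict value descending, then by key length ascending): idiomatic decomposition, same results.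


-- ===== PORT A =====
-- Python's `divisibility_rules.get` used as a sort key; exact here because every key it is
-- applied to is a key of the dict, so `.get` never returns None (shared by both ports).
def pyDictGet (divisibility_rules : List (String × Int)) (k : String) : Int :=
  (PySem.Dict.mk divisibility_rules).getD k 0

def rule_sort (divisibility_rules : List (String × Int)) : List String :=
  -- rule_digits = {}; for digits in divisibility_rules.keys(): rule_digits[digits] = len(digits)
  let rule_digits : PySem.Dict String Int :=
    ((PySem.Dict.mk divisibility_rules).keys).foldl
      (fun d digits => d.insert digits (PySem.Str.len digits)) PySem.Dict.empty
  -- for digit_count in sorted(list(set(rule_digits.values()))): …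
  (PySem.List.sorted (PySem.Set.ofList rule_digits.values) (fun x => x) false).foldl
    (fun sorted_rules digit_count =>
      -- for digits, digit_num in rule_digits.items(): if digit_num == digit_count: append
      let digit_count_lst : List String :=
        rule_digits.items.foldl
          (fun l dd => if dd.2 == digit_count then l ++ [dd.1] else l) []
      -- sorted_rules.extend(sorted(digit_count_lst, key=divisibility_rules.get, reverse=True))
      sorted_rules ++ PySem.List.sorted digit_count_lst (pyDictGet divisibility_rules) true)
    []

-- ===== PORT B =====
def rule_sort_alt (divisibility_rules : List (String × Int)) : List String :=
  -- by_value = sorted(divisibility_rules.keys(), key=divisibility_rules.get, reverse=True)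
  let by_value :=
    PySem.List.sorted (PySem.Dict.mk divisibility_rules).keys
      (pyDictGet divisibility_rules) true
  -- return sorted(by_value, key=len)
  PySem.List.sorted by_value PySem.Str.len false

-- ===== PRECONDITION & SPEC =====
-- The Python argument is a dict, whose keys are distinct; an association list with duplicate
-- keys does not represent any dict, so such lists are excluded (this excludes no dict input).
def Pre_rule_sort (divisibility_rules : List (String × Int)) : Prop :=
  (divisibility_rules.map Prod.fst).Nodup
instance (divisibility_rules : List (String × Int)) : Decidable (Pre_rule_sort divisibility_rules) := by
  unfold Pre_rule_sort; infer_instance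

def pvWitness_rule_sort : (List (String × Int)) := [("a", 1), ("bb", 2), ("c", 3)]

def Spec_rule_sort (divisibility_rules : List (String × Int)) (out : List String) : Prop :=
  out = rule_sort_alt divisibility_rules
instance (divisibility_rules : List (String × Int)) (out : List String) : Decidable (Spec_rule_sort divisibility_rules out) := by
  unfold Spec_rule_sort; infer_instance

-- ===== CLAIM (what is proved, stated in full; the proofs are below) =====
def Claim_equal_rule_sort : Prop := ∀ (divisibility_rules : List (String × Int)), Dom_rule_sort divisibility_rules → Pre_rule_sort divisibility_rules → Spec_rule_sort divisibility_rules (rule_sort divisibility_rules)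

-- ===== LEMMAS AND PROOFS =====

theorem insertBy_cons_of_before {α : Type} (before : α → α → Bool) (x y : α) (ys : List α)
    (h : before x y = true) :
    PySem.List.insertBy before x (y :: ys) = x :: y :: ys := by
  simp [PySem.List.insertBy, h]

theorem insertBy_cons_of_not_before {α : Type} (before : α → α → Bool) (x y : α) (ys : List α)
    (h : ¬ before x y = true) :
    PySem.List.insertBy before x (y :: ys) = y :: PySem.List.insertBy before x ys := by
  simp [PySem.List.insertBy, h]

theorem insertBy_of_forall_before {α : Type} (before : α → α → Bool) (x : α) (zs : List α)
    (h : ∀ b ∈ zs, before x b = true) :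
    PySem.List.insertBy before x zs = x :: zs := by
  cases zs with
  | nil => simp [PySem.List.insertBy]
  | cons b t => exact insertBy_cons_of_before _ _ _ _ (h b (by simp))

-- filtering commutes with one stable insertion, provided later elements only get "more before"
theorem filter_insertBy {α : Type} (before : α → α → Bool) (p : α → Bool) (x : α) (ys : List α)
    (h : List.Pairwise (fun a b => before x a = true → before x b = true) ys) :
    (PySem.List.insertBy before x ys).filter p
      = if p x then PySem.List.insertBy before x (ys.filter p) else ys.filter p := by
  induction ys with
  | nil =>
      by_cases hp : p x = true <;> simp [PySem.List.insertBy, hp]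
  | cons y ys ih =>
      rcases List.pairwise_cons.mp h with ⟨hy, htail⟩
      by_cases hb : before x y = true
      · rw [insertBy_cons_of_before _ _ _ _ hb]
        by_cases hpy : p y = true
        · by_cases hpx : p x = true <;>
            simp [hpx, hpy, insertBy_cons_of_before _ _ _ _ hb]
        · have hall : ∀ b ∈ ys.filter p, before x b = true := by
            intro b hbmem
            exact hy b (List.mem_of_mem_filter hbmem) hb
          by_cases hpx : p x = true <;>
            simp [hpx, hpy, insertBy_of_forall_before _ _ _ hall]
      · rw [insertBy_cons_of_not_before _ _ _ _ hb]
        by_cases hpy : p y = true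
        · by_cases hpx : p x = true <;>
            simp [hpx, hpy, ih htail,
              insertBy_cons_of_not_before _ _ _ _ hb]
        · by_cases hpx : p x = true <;> simp [hpx, hpy, ih htail]

-- filtering commutes with a stable ascending sort
theorem filter_sorted {α κ : Type} [LinearOrder κ] (xs : List α) (key : α → κ) (p : α → Bool) :
    (PySem.List.sorted xs key false).filter p = PySem.List.sorted (xs.filter p) key false := by
  induction xs using List.reverseRecOn with
  | nil => simp [PySem.List.sorted_eq_foldl_insertBy]
  | append_singleton xs a ih =>
      rw [PySem.List.sorted_eq_foldl_insertBy, List.foldl_append, List.foldl_cons, List.foldl_nil,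
        ← PySem.List.sorted_eq_foldl_insertBy]
      have hs := PySem.List.sorted_pairwise xs key
      have hpw : List.Pairwise
          (fun u v => (decide (key a < key u)) = true → (decide (key a < key v)) = true)
          (PySem.List.sorted xs key false) := by
        refine hs.imp ?_
        intro u v huv
        simp only [decide_eq_true_eq]
        intro hlt; exact lt_of_lt_of_le hlt huv
      rw [filter_insertBy _ p a _ hpw]
      have hfa : List.filter p [a] = if p a = true then [a] else [] := by
        by_cases hpa : p a = true <;> simp [hpa]
      by_cases hpa : p a = true
      · rw [List.filter_append, hfa, if_pos hpa, if_pos hpa, ih,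
          PySem.List.sorted_eq_foldl_insertBy (xs.filter p ++ [a]),
          List.foldl_append, List.foldl_cons, List.foldl_nil, ← PySem.List.sorted_eq_foldl_insertBy]
      · rw [List.filter_append, hfa, if_neg hpa, if_neg hpa, List.append_nil, ih]

-- filtering commutes with a stable descending sort
theorem filter_sorted_rev {α κ : Type} [LinearOrder κ] (xs : List α) (key : α → κ) (p : α → Bool) :
    (PySem.List.sorted xs key true).filter p = PySem.List.sorted (xs.filter p) key true := by
  induction xs using List.reverseRecOn with
  | nil => simp [PySem.List.sorted_rev_eq_foldl_insertBy]
  | append_singleton xs a ih =>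
      rw [PySem.List.sorted_rev_eq_foldl_insertBy, List.foldl_append, List.foldl_cons, List.foldl_nil,
        ← PySem.List.sorted_rev_eq_foldl_insertBy]
      have hs := PySem.List.sorted_pairwise_rev xs key
      have hpw : List.Pairwise
          (fun u v => (decide (key u < key a)) = true → (decide (key v < key a)) = true)
          (PySem.List.sorted xs key true) := by
        refine hs.imp ?_
        intro u v huv
        simp only [decide_eq_true_eq]
        intro hlt; exact lt_of_le_of_lt huv hlt
      rw [filter_insertBy _ p a _ hpw]
      have hfa : List.filter p [a] = if p a = true then [a] else [] := by
        by_cases hpa : p a = true <;> simp [hpa]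
      by_cases hpa : p a = true
      · rw [List.filter_append, hfa, if_pos hpa, if_pos hpa, ih,
          PySem.List.sorted_rev_eq_foldl_insertBy (xs.filter p ++ [a]),
          List.foldl_append, List.foldl_cons, List.foldl_nil,
          ← PySem.List.sorted_rev_eq_foldl_insertBy]
      · rw [List.filter_append, hfa, if_neg hpa, if_neg hpa, List.append_nil, ih]

-- a list in which p-elements always precede non-p-elements splits as filter ++ filter-not
theorem filter_split {α : Type} (p : α → Bool) (M : List α)
    (h : List.Pairwise (fun a b => p b = true → p a = true) M) :
    M = M.filter p ++ M.filter (fun x => !p x) := by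
  induction M with
  | nil => simp
  | cons a M ih =>
      rcases List.pairwise_cons.mp h with ⟨ha, htail⟩
      by_cases hpa : p a = true
      · simp only [List.filter_cons, hpa, if_pos, Bool.not_true]
        simpa using ih htail
      · have hnone : ∀ b ∈ M, ¬ p b = true := fun b hb hpb => hpa (ha b hb hpb)
        have h1 : M.filter p = [] := List.filter_eq_nil_iff.mpr hnone
        have h2 : M.filter (fun x => !p x) = M :=
          List.filter_eq_self.mpr (fun b hb => by simp [hnone b hb])
        simp [hpa, h1, h2]

-- a key-ascending list is the concatenation of its key-groups, taken in increasing key order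
theorem grouped {α : Type} (key : α → Int) (cs : List Int) (M : List α)
    (hcs : List.Pairwise (· < ·) cs) (hM : List.Pairwise (fun a b => key a ≤ key b) M)
    (hmem : ∀ x ∈ M, key x ∈ cs) :
    M = cs.flatMap (fun c => M.filter (fun x => key x == c)) := by
  induction cs generalizing M with
  | nil =>
      cases M with
      | nil => simp
      | cons a M => exact absurd (hmem a (by simp)) (by simp)
  | cons c cs ih =>
      rcases List.pairwise_cons.mp hcs with ⟨hclt, hcs'⟩
      have hkey : ∀ x ∈ M, key x = c ∨ (key x ∈ cs ∧ c < key x) := by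
        intro x hx
        rcases List.mem_cons.mp (hmem x hx) with h | h
        · exact Or.inl h
        · exact Or.inr ⟨h, hclt _ h⟩
      have hsplit : M = M.filter (fun x => key x == c) ++ M.filter (fun x => !(key x == c)) := by
        refine filter_split _ M (List.Pairwise.imp_of_mem ?_ hM)
        intro a b ha hb hab
        simp only [beq_iff_eq]
        intro hbc
        rcases hkey a ha with h | ⟨_, hlt⟩
        · exact h
        · omega
      have hM₂pw : List.Pairwise (fun a b => key a ≤ key b)
          (M.filter (fun x => !(key x == c))) := hM.filter _
      have hM₂mem : ∀ x ∈ M.filter (fun x => !(key x == c)), key x ∈ cs := by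
        intro x hx
        have hxc : ¬ (key x = c) := by
          have := List.of_mem_filter hx
          simpa using this
        rcases hkey x (List.mem_of_mem_filter hx) with h | ⟨h, _⟩
        · exact absurd h hxc
        · exact h
      have hIH := ih (M.filter (fun x => !(key x == c))) hcs' hM₂pw hM₂mem
      have hgrp : ∀ c' ∈ cs,
          (M.filter (fun x => !(key x == c))).filter (fun x => key x == c')
            = M.filter (fun x => key x == c') := by
        intro c' hc'
        rw [List.filter_filter]
        apply List.filter_congr
        intro x _
        have hne : c ≠ c' := ne_of_lt (hclt c' hc')
        by_cases h : key x = c'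
        · simp [h, hne.symm]
        · simp [h]
      rw [List.flatMap_cons]
      conv_lhs => rw [hsplit]
      congr 1
      rw [hIH]
      have : ∀ c' ∈ cs,
          (fun c'' => (M.filter (fun x => !(key x == c))).filter (fun x => key x == c'')) c'
            = (fun c'' => M.filter (fun x => key x == c'')) c' := by
        intro c' hc'; exact hgrp c' hc'
      calc List.flatMap (fun c' => (M.filter (fun x => !(key x == c))).filter (fun x => key x == c')) cs
          = List.flatten (cs.map (fun c' => (M.filter (fun x => !(key x == c))).filter (fun x => key x == c'))) := by
            rw [List.flatMap_def]
        _ = List.flatten (cs.map (fun c' => M.filter (fun x => key x == c'))) := by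
            rw [List.map_congr_left this]
        _ = List.flatMap (fun c' => M.filter (fun x => key x == c')) cs := by
            rw [List.flatMap_def]

-- every element of a one-key group has that key, so the group is already sorted
theorem sorted_filter_key_eq {α : Type} (key : α → Int) (c : Int) (l : List α) :
    PySem.List.sorted (l.filter (fun x => key x == c)) key = l.filter (fun x => key x == c) := by
  apply PySem.List.sorted_eq_self_of_pairwise
  apply List.pairwise_of_forall_mem_list
  intro a ha b hb
  have h1 : key a = c := by simpa using List.of_mem_filter ha
  have h2 : key b = c := by simpa using List.of_mem_filter hb
  omega

-- the common grouped normal form of both programs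
theorem alt_eq_flatMap (dr : List (String × Int)) :
    rule_sort_alt dr
      = (PySem.List.sorted (PySem.Set.ofList ((dr.map Prod.fst).map PySem.Str.len)) (fun x => x)).flatMap
          (fun c => PySem.List.sorted
            ((dr.map Prod.fst).filter (fun k => PySem.Str.len k == c)) (pyDictGet dr) true) := by
  have hkeys : (PySem.Dict.mk dr).keys = dr.map Prod.fst := rfl
  set ks := dr.map Prod.fst with hks
  set g := pyDictGet dr with hg
  set L := PySem.List.sorted ks g true with hL
  set cs := PySem.List.sorted (PySem.Set.ofList (ks.map PySem.Str.len)) (fun x => x) with hcs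
  have hB : rule_sort_alt dr = PySem.List.sorted L PySem.Str.len := by
    simp only [rule_sort_alt, hkeys, ← hg, ← hL]
  rw [hB]
  have hgrouped : PySem.List.sorted L PySem.Str.len
      = cs.flatMap (fun c => (PySem.List.sorted L PySem.Str.len).filter (fun x => PySem.Str.len x == c)) := by
    apply grouped PySem.Str.len cs (PySem.List.sorted L PySem.Str.len)
      (PySem.List.sorted_ofList_pairwise_lt (ks.map PySem.Str.len))
      (PySem.List.sorted_pairwise L PySem.Str.len)
    intro x hx
    have hxks : x ∈ ks := by
      have := (PySem.List.mem_sorted L PySem.Str.len false x).mp hx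
      exact (PySem.List.mem_sorted ks g true x).mp this
    rw [hcs, PySem.List.mem_sorted, PySem.Set.mem_ofList]
    exact List.mem_map_of_mem hxks
  rw [hgrouped]
  rw [List.flatMap_def, List.flatMap_def]
  apply congrArg
  apply List.map_congr_left
  intro c _
  rw [filter_sorted L PySem.Str.len, sorted_filter_key_eq, hL,
    filter_sorted_rev ks g (fun x => PySem.Str.len x == c)]

theorem a_eq_flatMap (dr : List (String × Int)) (h : (dr.map Prod.fst).Nodup) :
    rule_sort dr
      = (PySem.List.sorted (PySem.Set.ofList ((dr.map Prod.fst).map PySem.Str.len)) (fun x => x)).flatMap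
          (fun c => PySem.List.sorted
            ((dr.map Prod.fst).filter (fun k => PySem.Str.len k == c)) (pyDictGet dr) true) := by
  have hitems :
      (List.foldl (fun d digits => d.insert digits (PySem.Str.len digits)) PySem.Dict.empty
        (List.map (fun x => x.1) dr)).items
      = (List.map (fun x => x.1) dr).map (fun k => (k, PySem.Str.len k)) := by
    have := PySem.Dict.items_foldl_insert_fresh (dr.map (fun x => x.1)) (fun a => a)
      PySem.Str.len PySem.Dict.empty (fun a _ => rfl) (by simpa using h)
    simpa using this
  simp only [rule_sort, PySem.Dict.keys, hitems, PySem.Dict.values,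
    PySem.List.foldl_append_if, PySem.List.foldl_append_eq_flatMap, List.nil_append,
    List.map_map, List.filter_map]
  rfl

-- ===== VERDICT (by name: the statement is the Claim_ definition above) =====
theorem rule_sort_spec : Claim_equal_rule_sort := by
  intro dr _ hpre
  unfold Spec_rule_sort
  rw [a_eq_flatMap dr hpre, alt_eq_flatMap dr]
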